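-- pv_equiv track=rewrite | github.com/pavansaipendry/BabyJay | app/rag/chat_backup.py | _filter_context_by_department
-- ===== SOURCE A (Python) =====
-- def _filter_context_by_department(context: str, department: str) -> str:
--     """Filter context to only include professors from specified department."""
--     if not context or "=== FACULTY INFORMATION ===" not in context:
--         return context
--
--     lines = context.split('\n')
--     filtered_lines = []
--     include_current = False
--     current_dept = ""
--     buffer = []
--
--     for line in lines:
--         if line.strip() == "=== FACULTY INFORMATION ===":
--             filtered_lines.append(line)
--             include_current = False
--             continue
--
--         if line.strip().startswith("===") and "FACULTY" not in line:
--             if include_current: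
--                 filtered_lines.extend(buffer)
--             buffer = []
--             include_current = False
--             filtered_lines.append(line)
--             continue
--
--         if line.strip().startswith("Professor:"):
--             if include_current:
--                 filtered_lines.extend(buffer)
--             buffer = [line]
--             include_current = False
--             current_dept = ""
--             continue
--
--         if line.strip().startswith("Department:"):
--             current_dept = line.strip().replace("Department:", "").strip()
--             buffer.append(line)
--             # Check if this department matches our filter
--             if department.lower() in current_dept.lower():
--                 include_current = True
--             continue
--
--         buffer.append(line)
--
--     # Flush final buffer
--     if include_current:
--         filtered_lines.extend(buffer)
--
--     return '\n'.join(filtered_lines)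
-- ===== SOURCE B (Python) =====
-- def _filter_context_by_department(context: str, department: str) -> str:
--     """Filter context to only include professors from specified department."""
--     if not context or "=== FACULTY INFORMATION ===" not in context:
--         return context
--     dep = department.lower()
--
--     def kind(line):
--         s = line.strip()
--         if s == "=== FACULTY INFORMATION ===" or (s.startswith("===") and "FACULTY" not in line):
--             return "header"
--         if s.startswith("Professor:"):
--             return "record"
--         return "body"
--
--     # pass 1: group the lines into pass-through headers and chunks of record lines
--     units = []
--     chunk = []
--     for line in context.split('\n'):
--         k = kind(line)
--         if k == "body":
--             chunk.append(line)
--         else: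
--             units.append(("chunk", chunk))
--             if k == "header":
--                 units.append(("header", line))
--             chunk = [line] if k == "record" else []
--     units.append(("chunk", chunk))
--
--     # a chunk is kept iff one of its Department lines names the wanted department
--     def keeps(lines):
--         return any(dep in line.strip().replace("Department:", "").strip().lower()
--                    for line in lines if line.strip().startswith("Department:"))
--
--     # pass 2: headers pass through, kept chunks are emitted whole
--     out = []
--     for k, u in units:
--         if k == "header":
--             out.append(u)
--         elif keeps(u):
--             out.extend(u)
--     return '\n'.join(out)
-- ===== Notes on version B (the rewrite author's own statement) =====
-- stated objective: alternative
-- what changed: Replaces A's single stateful sweep (include flag, current_dept and buffer mutated across five branch kinds) by a two-pass decomposition: first group the lines into pass-through header lines and chunks of record lines, then render each unit independently, keeping a chunk iff one of its Department lines names the wanted department; …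
import Mathlib
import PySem

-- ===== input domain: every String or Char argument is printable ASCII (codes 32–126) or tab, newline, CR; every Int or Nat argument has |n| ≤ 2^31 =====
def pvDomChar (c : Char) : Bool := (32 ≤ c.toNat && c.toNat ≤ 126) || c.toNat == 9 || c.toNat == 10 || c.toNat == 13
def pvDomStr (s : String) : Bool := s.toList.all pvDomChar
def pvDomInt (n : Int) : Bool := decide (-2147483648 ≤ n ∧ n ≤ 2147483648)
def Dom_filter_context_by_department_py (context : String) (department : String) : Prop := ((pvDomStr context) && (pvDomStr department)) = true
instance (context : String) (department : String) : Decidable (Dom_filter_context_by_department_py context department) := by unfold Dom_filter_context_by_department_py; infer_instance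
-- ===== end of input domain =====

-- B replaces A's single stateful sweep by a group-then-render two-pass decomposition (alternative, same cost);
-- Pre_ excludes malformed contexts where the FACULTY title line recurs inside a contentful block while the
-- wanted department matches somewhere: on that unspecified corner A's and B's readings diverge.


-- ===== PORT A =====
-- line.strip().replace("Department:", "").strip()  (the department-name expression both Pythons use)
def pvDept (line : String) : String :=
  PySem.Str.strip (PySem.Str.replace (PySem.Str.strip line) "Department:" "")

-- A's loop body; state = (filtered_lines, include_current, current_dept, buffer)
def pvStepA (department : String) (st : List String × Bool × String × List String)
    (line : String) : List String × Bool × String × List String :=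
  let (filtered, inc, cd, buf) := st
  if PySem.Str.strip line = "=== FACULTY INFORMATION ===" then
    (filtered ++ [line], false, cd, buf)
  else if PySem.Str.startswith (PySem.Str.strip line) "===" && !(PySem.Str.isIn "FACULTY" line) then
    ((if inc then filtered ++ buf else filtered) ++ [line], false, cd, [])
  else if PySem.Str.startswith (PySem.Str.strip line) "Professor:" then
    ((if inc then filtered ++ buf else filtered), false, "", [line])
  else if PySem.Str.startswith (PySem.Str.strip line) "Department:" then
    (filtered,
     if PySem.Str.isIn (PySem.Str.lower department) (PySem.Str.lower (pvDept line)) then true else inc,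
     pvDept line, buf ++ [line])
  else
    (filtered, inc, cd, buf ++ [line])

def filter_context_by_department_py (context : String) (department : String) : String :=
  if context = "" ∨ PySem.Str.isIn "=== FACULTY INFORMATION ===" context = false then context
  else
    let lines := (PySem.Str.split? context "\n").getD []
    let st := lines.foldl (pvStepA department) ([], false, "", [])
    PySem.Str.join "\n" (st.1 ++ (if st.2.1 then st.2.2.2 else []))

-- ===== PORT B =====
inductive PvKind | header | record | body
deriving DecidableEq, Repr

-- B's `kind`
def pvKind (line : String) : PvKind :=
  let s := PySem.Str.strip line
  if s = "=== FACULTY INFORMATION ===" ∨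
     (PySem.Str.startswith s "===" && !(PySem.Str.isIn "FACULTY" line)) = true then .header
  else if PySem.Str.startswith s "Professor:" = true then .record
  else .body

inductive PvUnit
  | header : String → PvUnit
  | chunk : List String → PvUnit
deriving DecidableEq, Repr

-- B's pass-1 loop body; state = (units, current chunk)
def pvStepB (st : List PvUnit × List String) (line : String) : List PvUnit × List String :=
  match pvKind line with
  | .body => (st.1, st.2 ++ [line])
  | .header => (st.1 ++ [PvUnit.chunk st.2, PvUnit.header line], [])
  | .record => (st.1 ++ [PvUnit.chunk st.2], [line])

-- B's `keeps`
def pvKeeps (dep : String) (ls : List String) : Bool :=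
  ls.any (fun l => PySem.Str.startswith (PySem.Str.strip l) "Department:" &&
                   PySem.Str.isIn dep (PySem.Str.lower (pvDept l)))

-- B's pass 2, per unit
def pvRenderU (dep : String) : PvUnit → List String
  | .header l => [l]
  | .chunk ls => if pvKeeps dep ls then ls else []

def filter_context_by_department_py_alt (context : String) (department : String) : String :=
  if context = "" ∨ PySem.Str.isIn "=== FACULTY INFORMATION ===" context = false then context
  else
    let dep := PySem.Str.lower department
    let st := ((PySem.Str.split? context "\n").getD []).foldl pvStepB ([], [])
    PySem.Str.join "\n" ((st.1 ++ [PvUnit.chunk st.2]).flatMap (pvRenderU dep))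

-- ===== PRECONDITION & SPEC =====
-- D_'s vocabulary: pvScan walks the (character-list) lines tracking whether the current
-- `===`-header-delimited block has record content, and returns false iff a FACULTY title line
-- occurs after record content within a block
def pvScan : Bool → List (List Char) → Bool
  | _, [] => true
  | s, l :: r =>
    let c := PySem.Chars.strip l
    if c = "=== FACULTY INFORMATION ===".toList then !s && pvScan s r
    else if "===".toList.isPrefixOf c && !(PySem.Chars.isIn "FACULTY".toList l) then pvScan false r
    else pvScan true r

-- Pre_ excludes malformed contexts in which the '=== FACULTY INFORMATION ===' title line recurs inside a
-- header/Professor-delimited block that already has record lines while the wanted department matches some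
-- Department line: a context carries that title once, so the corner is unspecified and A's and B's readings
-- are equally defensible there (A clears its include flag at the recurring title without flushing its
-- buffer; B treats the title as a section boundary).
def Pre_filter_context_by_department_py (context : String) (department : String) : Prop :=
  let L := PySem.Chars.splitOn context.toList "\n".toList
  pvScan false L = true ∨
  L.any (fun l => "Department:".toList.isPrefixOf (PySem.Chars.strip l) &&
    PySem.Chars.isIn (PySem.Chars.lower department.toList)
      (PySem.Chars.lower (PySem.Chars.strip
        (PySem.Chars.replace (PySem.Chars.strip l) "Department:".toList [])))) = false
instance (context : String) (department : String) : Decidable (Pre_filter_context_by_department_py context department) := by unfold Pre_filter_context_by_department_py; infer_instance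

def pvWitness_filter_context_by_department_py : String × String :=
  ("=== FACULTY INFORMATION ===\nProfessor: X\nDepartment: CS\nProfessor: Y\nDepartment: Math", "cs")

def Spec_filter_context_by_department_py (context : String) (department : String) (out : String) : Prop := out = filter_context_by_department_py_alt context department
instance (context : String) (department : String) (out : String) : Decidable (Spec_filter_context_by_department_py context department out) := by unfold Spec_filter_context_by_department_py; infer_instance

-- ===== CLAIM (what is proved, stated in full; the proofs are below) =====
def Claim_equal_filter_context_by_department_py : Prop := ∀ (context : String) (department : String), Dom_filter_context_by_department_py context department → Pre_filter_context_by_department_py context department → Spec_filter_context_by_department_py context department (filter_context_by_department_py context department)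

-- ===== LEMMAS AND PROOFS =====

inductive PvTag | F | H | P | D | O
deriving DecidableEq, Repr

-- proof-side classifier and match test, in the ports' spelling
def pvTag (line : String) : PvTag :=
  if PySem.Str.strip line = "=== FACULTY INFORMATION ===" then .F
  else if PySem.Str.startswith (PySem.Str.strip line) "===" && !(PySem.Str.isIn "FACULTY" line) then .H
  else if PySem.Str.startswith (PySem.Str.strip line) "Professor:" then .P
  else if PySem.Str.startswith (PySem.Str.strip line) "Department:" then .D
  else .O

theorem pvStrip_eq_iff (line t : String) :
    (PySem.Str.strip line = t) ↔ (PySem.Chars.strip line.toList = t.toList) := by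
  constructor
  · intro h; rw [← PySem.Str.toList_strip, h]
  · intro h
    have := congrArg String.ofList h
    simpa [PySem.Str.strip] using this

theorem pvStartswith_eq (s p : String) :
    PySem.Str.startswith s p = p.toList.isPrefixOf s.toList := by
  rw [Bool.eq_iff_iff, List.isPrefixOf_iff_prefix]
  rw [PySem.Str.startswith_eq, PySem.Chars.startswith_iff]

-- the same classification in the Chars spelling pvOk uses
def pvTagD (line : List Char) : PvTag :=
  if PySem.Chars.strip line = "=== FACULTY INFORMATION ===".toList then .F
  else if "===".toList.isPrefixOf (PySem.Chars.strip line)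
          && !(PySem.Chars.isIn "FACULTY".toList line) then .H
  else if "Professor:".toList.isPrefixOf (PySem.Chars.strip line) then .P
  else if "Department:".toList.isPrefixOf (PySem.Chars.strip line) then .D
  else .O

theorem pvTagD_eq (line : String) : pvTagD line.toList = pvTag line := by
  simp only [pvTagD, pvTag, ← pvStrip_eq_iff, pvStartswith_eq, PySem.Str.toList_strip,
    PySem.Str.isIn_eq]

-- proof-side form of the match test, as the ports compute it
def pvMatches (dep : String) (line : String) : Bool :=
  PySem.Str.isIn dep (PySem.Str.lower (pvDept line))

theorem pvCharsMatch_eq (d : String) (l : String) :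
    PySem.Chars.isIn (PySem.Chars.lower d.toList)
      (PySem.Chars.lower (PySem.Chars.strip
        (PySem.Chars.replace (PySem.Chars.strip l.toList) "Department:".toList []))) =
      pvMatches (PySem.Str.lower d) l := by
  simp [pvMatches, pvDept]

theorem pvScan_by_tagD (s : Bool) (l : List Char) (r : List (List Char)) :
    pvScan s (l :: r) =
      match pvTagD l with
      | .F => !s && pvScan s r
      | .H => pvScan false r
      | _ => pvScan true r := by
  simp only [pvScan, pvTagD]
  split_ifs <;> rfl

-- pvScan in the ports' spelling
def pvScanM : Bool → List String → Bool
  | _, [] => true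
  | s, l :: r =>
    match pvTag l with
    | .F => !s && pvScanM s r
    | .H => pvScanM false r
    | _ => pvScanM true r

theorem pvScan_eq (lines : List String) :
    ∀ s, pvScan s (lines.map String.toList) = pvScanM s lines := by
  induction lines with
  | nil => intro s; rfl
  | cons l r ih =>
    intro s
    rw [List.map_cons, pvScan_by_tagD, pvTagD_eq]
    cases ht : pvTag l <;> simp [pvScanM, ht, ih]

-- the flag record pvMain needs, with pvTag and pvMatches: false iff a FACULTY title line cuts
-- a contentful block that also carries a matching Department line
def pvOkM (dep : String) : Bool → Bool → Bool → List String → Bool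
  | _, _, _, [] => true
  | s, m, p, l :: rest =>
    match pvTag l with
    | .F => !(s && m) && pvOkM dep s m s rest
    | .H => pvOkM dep false false false rest
    | .P => pvOkM dep true false false rest
    | .D => if pvMatches dep l then !p && pvOkM dep true true p rest
            else pvOkM dep true m p rest
    | .O => pvOkM dep true m p rest

-- structural half: a clean pvScan forces pvOkM true (the title never cuts content, so s is false
-- at every title and p never rises)
theorem pvScanM_okM (dep : String) (lines : List String) :
    ∀ s m, pvScanM s lines = true → pvOkM dep s m false lines = true := by
  induction lines with
  | nil => intro s m _; rfl
  | cons l r ih =>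
    intro s m h
    cases ht : pvTag l <;> simp only [pvScanM, ht] at h <;> simp only [pvOkM, ht]
    case F =>
      rw [Bool.and_eq_true] at h
      obtain ⟨hs, h2⟩ := h
      have hs' : s = false := by simpa using hs
      subst hs'
      simpa using ih false m h2
    case H => exact ih false false h
    case P => exact ih true false h
    case D =>
      by_cases hm : pvMatches dep l = true
      · simp [hm, ih true true h]
      · rw [Bool.not_eq_true] at hm
        simp [hm, ih true m h]
    case O => exact ih true m h
theorem pvSplit_toList (s : String) :
    ((PySem.Str.split? s "\n").getD []).map String.toList =
      PySem.Chars.splitOn s.toList "\n".toList := by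
  have h := PySem.Str.split?_map s "\n"
  rw [show PySem.Chars.split? s.toList "\n".toList
      = some (PySem.Chars.splitOn s.toList "\n".toList) by simp [PySem.Chars.split?]] at h
  cases o : PySem.Str.split? s "\n" with
  | none => rw [o] at h; simp at h
  | some xs => rw [o] at h; simpa using h

-- the continuation view of A's loop: what remains to be appended to filtered_lines
def pvContA (dep : String) (inc : Bool) (buf : List String) : List String → List String
  | [] => if inc then buf else []
  | l :: rest =>
    match pvTag l with
    | .F => l :: pvContA dep false buf rest
    | .H => (if inc then buf else []) ++ l :: pvContA dep false [] rest
    | .P => (if inc then buf else []) ++ pvContA dep false [l] rest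
    | .D => pvContA dep (if pvMatches dep l then true else inc) (buf ++ [l]) rest
    | .O => pvContA dep inc (buf ++ [l]) rest

-- A's branch cascade, phrased through pvTag
theorem pvStepA_tag (department : String) (st : List String × Bool × String × List String)
    (line : String) :
    pvStepA department st line =
      match pvTag line with
      | .F => (st.1 ++ [line], false, st.2.2.1, st.2.2.2)
      | .H => ((if st.2.1 then st.1 ++ st.2.2.2 else st.1) ++ [line], false, st.2.2.1, [])
      | .P => ((if st.2.1 then st.1 ++ st.2.2.2 else st.1), false, "", [line])
      | .D => (st.1, if pvMatches (PySem.Str.lower department) line then true else st.2.1,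
               pvDept line, st.2.2.2 ++ [line])
      | .O => (st.1, st.2.1, st.2.2.1, st.2.2.2 ++ [line]) := by
  obtain ⟨f, i, c, b⟩ := st
  simp only [pvStepA, pvTag, pvMatches]
  split_ifs <;> rfl

theorem pvFoldA_cont (department : String) (lines : List String) :
    ∀ (acc : List String) (inc : Bool) (cd : String) (buf : List String),
    (let st := lines.foldl (pvStepA department) (acc, inc, cd, buf)
     st.1 ++ (if st.2.1 then st.2.2.2 else [])) =
      acc ++ pvContA (PySem.Str.lower department) inc buf lines := by
  induction lines with
  | nil => intro acc inc cd buf; simp [pvContA]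
  | cons l rest ih =>
    intro acc inc cd buf
    simp only [List.foldl_cons, pvStepA_tag]
    cases h : pvTag l <;>
      simp only [pvContA, h, ih] <;> (try split_ifs) <;> simp

-- B's `kind` through the five-way classification
theorem pvKind_tag (line : String) :
    pvKind line =
      match pvTag line with
      | .F => .header | .H => .header | .P => .record | .D => .body | .O => .body := by
  simp only [pvKind, pvTag]
  split_ifs <;> simp_all

-- the continuation view of B's pass 1 + pass 2: what remains to be emitted
def pvContB (dep : String) (chunk : List String) : List String → List String
  | [] => if pvKeeps dep chunk then chunk else []
  | l :: rest =>
    match pvTag l with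
    | .F => (if pvKeeps dep chunk then chunk else []) ++ l :: pvContB dep [] rest
    | .H => (if pvKeeps dep chunk then chunk else []) ++ l :: pvContB dep [] rest
    | .P => (if pvKeeps dep chunk then chunk else []) ++ pvContB dep [l] rest
    | .D => pvContB dep (chunk ++ [l]) rest
    | .O => pvContB dep (chunk ++ [l]) rest

theorem pvFoldB_cont (dep : String) (lines : List String) :
    ∀ (units : List PvUnit) (chunk : List String),
    (let st := lines.foldl pvStepB (units, chunk)
     (st.1 ++ [PvUnit.chunk st.2]).flatMap (pvRenderU dep)) =
      units.flatMap (pvRenderU dep) ++ pvContB dep chunk lines := by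
  induction lines with
  | nil => intro units chunk; simp [pvContB, pvRenderU]
  | cons l rest ih =>
    intro units chunk
    simp only [List.foldl_cons, pvStepB, pvKind_tag]
    cases h : pvTag l <;>
      simp [pvContB, h, ih, pvRenderU]

-- prefix facts about the classification, used to evaluate pvKeeps on the lines a chunk receives
theorem pvTag_D_dept (l : String) (h : pvTag l = .D) :
    PySem.Str.startswith (PySem.Str.strip l) "Department:" = true := by
  simp only [pvTag] at h
  split_ifs at h
  assumption

theorem pvTag_O_dept (l : String) (h : pvTag l = .O) :
    PySem.Str.startswith (PySem.Str.strip l) "Department:" = false := by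
  simp only [pvTag] at h
  split_ifs at h with h1 h2 h3 h4
  exact Bool.eq_false_iff.mpr h4

theorem pvTag_P_dept (l : String) (h : pvTag l = .P) :
    PySem.Str.startswith (PySem.Str.strip l) "Department:" = false := by
  simp only [pvTag] at h
  split_ifs at h with h1 h2 h3
  have hp : ("Professor:".toList) <+: (PySem.Str.strip l).toList := by
    have := h3
    rw [PySem.Str.startswith_eq, PySem.Chars.startswith_iff] at this
    exact this
  by_contra hd
  rw [Bool.not_eq_false, PySem.Str.startswith_eq, PySem.Chars.startswith_iff] at hd
  obtain ⟨t1, e1⟩ := hp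
  obtain ⟨t2, e2⟩ := hd
  rw [← e1] at e2
  simp at e2

theorem pvKeeps_nil (dep : String) : pvKeeps dep [] = false := rfl

theorem pvKeeps_append_D (dep : String) (c : List String) (l : String) (h : pvTag l = .D) :
    pvKeeps dep (c ++ [l]) = (pvKeeps dep c || pvMatches dep l) := by
  have hd := pvTag_D_dept l h
  simp only [pvKeeps, pvMatches, List.any_append, List.any_cons, List.any_nil, hd,
    Bool.true_and, Bool.or_false]

theorem pvKeeps_append_O (dep : String) (c : List String) (l : String) (h : pvTag l = .O) :
    pvKeeps dep (c ++ [l]) = pvKeeps dep c := by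
  have hd := pvTag_O_dept l h
  simp only [pvKeeps, List.any_append, List.any_cons, List.any_nil, hd,
    Bool.false_and, Bool.or_false]

theorem pvKeeps_P (dep : String) (l : String) (h : pvTag l = .P) :
    pvKeeps dep [l] = false := by
  have hd := pvTag_P_dept l h
  simp only [pvKeeps, List.any_cons, List.any_nil, hd, Bool.false_and, Bool.or_false]

theorem pvKeeps_append (dep : String) (c d : List String) :
    pvKeeps dep (c ++ d) = (pvKeeps dep c || pvKeeps dep d) := by
  simp only [pvKeeps, List.any_append]

theorem pvKeeps_cons (dep l : String) (r : List String) :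
    pvKeeps dep (l :: r) =
      ((PySem.Str.startswith (PySem.Str.strip l) "Department:" &&
        PySem.Str.isIn dep (PySem.Str.lower (pvDept l))) || pvKeeps dep r) := by
  simp only [pvKeeps, List.any_cons]

-- matching half: with no matching Department line anywhere, pvOkM is true
theorem pvKeeps_okM (dep : String) (lines : List String) :
    ∀ s p, pvKeeps dep lines = false → pvOkM dep s false p lines = true := by
  induction lines with
  | nil => intro s p _; rfl
  | cons l r ih =>
    intro s p h
    rw [pvKeeps_cons, Bool.or_eq_false_iff] at h
    obtain ⟨hp, h'⟩ := h
    cases ht : pvTag l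
    case F =>
      simp only [pvOkM, ht, Bool.and_false, Bool.not_false, Bool.true_and]
      exact ih s s h'
    case H => simpa only [pvOkM, ht] using ih false false h'
    case P => simpa only [pvOkM, ht] using ih true false h'
    case D =>
      have hd := pvTag_D_dept l ht
      rw [hd, Bool.true_and] at hp
      simp only [pvOkM, ht, pvMatches, hp, Bool.false_eq_true, if_false]
      exact ih true p h'
    case O => simpa only [pvOkM, ht] using ih true p h'

-- bridge: D_'s any-matching-Department test is pvKeeps on the string lines
theorem pvAny_eq (d : String) (lines : List String) :
    ((lines.map String.toList).any (fun l => "Department:".toList.isPrefixOf (PySem.Chars.strip l) &&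
      PySem.Chars.isIn (PySem.Chars.lower d.toList)
        (PySem.Chars.lower (PySem.Chars.strip
          (PySem.Chars.replace (PySem.Chars.strip l) "Department:".toList []))))) =
      pvKeeps (PySem.Str.lower d) lines := by
  induction lines with
  | nil => rfl
  | cons l r ih =>
    simp only [List.map_cons, List.any_cons, ih, pvKeeps, pvCharsMatch_eq]
    have e : "Department:".toList.isPrefixOf (PySem.Chars.strip l.toList) =
        PySem.Str.startswith (PySem.Str.strip l) "Department:" := by
      rw [pvStartswith_eq]; simp
    rw [e]
    rfl

-- the invariant: A's state is (inc = pvKeeps chunk, buf = junk ++ chunk) where junk is content a FACULTY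
-- title cut off from the running chunk; pvOk rules out the inputs where that junk could ever be flushed
theorem pvMain (dep : String) : ∀ (lines junk chunk : List String),
    pvKeeps dep junk = false →
    (junk ≠ [] → pvKeeps dep chunk = false) →
    pvOkM dep (decide (junk ++ chunk ≠ [])) (pvKeeps dep chunk) (decide (junk ≠ [])) lines = true →
    pvContA dep (pvKeeps dep chunk) (junk ++ chunk) lines = pvContB dep chunk lines := by
  intro lines
  induction lines with
  | nil =>
    intro junk chunk h1 h2 hok
    simp only [pvContA, pvContB]
    cases hk : pvKeeps dep chunk with
    | false => simp
    | true =>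
      have hj : junk = [] := by
        by_contra hne
        rw [h2 hne] at hk; exact Bool.false_ne_true hk
      simp [hj]
  | cons l rest ih =>
    intro junk chunk h1 h2 hok
    cases ht : pvTag l with
    | F =>
      simp only [pvOkM, ht, Bool.and_eq_true, Bool.not_eq_true', Bool.and_eq_false_iff] at hok
      obtain ⟨hsm, hok'⟩ := hok
      have hm : pvKeeps dep chunk = false := by
        cases hm : pvKeeps dep chunk with
        | false => rfl
        | true =>
          rcases hsm with hs | hm'
          · -- junk ++ chunk = [] forces chunk = [], contradicting pvKeeps chunk = true
            simp only [decide_eq_false_iff_not, not_not] at hs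
            have : chunk = [] := (List.append_eq_nil_iff.mp hs).2
            rw [this] at hm; exact absurd hm (by simp [pvKeeps_nil])
          · rw [hm] at hm'; exact absurd hm' (by simp)
      simp only [pvContA, pvContB, ht, hm, Bool.false_eq_true, if_false]
      have harg : pvOkM dep (decide ((junk ++ chunk) ++ ([]:List String) ≠ []))
          (pvKeeps dep ([]:List String)) (decide (junk ++ chunk ≠ [])) rest = true := by
        rw [pvKeeps_nil]
        have e : decide ((junk ++ chunk) ++ ([]:List String) ≠ []) = decide (junk ++ chunk ≠ []) := by
          simp
        rw [e]
        rw [hm] at hok'; exact hok'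
      have hrec := ih (junk ++ chunk) [] (by rw [pvKeeps_append, h1, hm]; rfl)
        (fun _ => pvKeeps_nil dep) harg
      rw [pvKeeps_nil] at hrec
      simp only [List.append_nil] at hrec
      rw [hrec]
      rfl
    | H =>
      simp only [pvOkM, ht] at hok
      simp only [pvContA, pvContB, ht]
      have harg : pvOkM dep (decide (([]:List String) ++ ([]:List String) ≠ []))
          (pvKeeps dep ([]:List String)) (decide (([]:List String) ≠ [])) rest = true := by
        rw [pvKeeps_nil]; simpa using hok
      have hrec := ih [] [] (pvKeeps_nil dep) (fun h => absurd rfl h) harg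
      rw [pvKeeps_nil] at hrec
      simp only [List.nil_append] at hrec
      rw [hrec]
      cases hk : pvKeeps dep chunk with
      | false => simp
      | true =>
        have hj : junk = [] := by
          by_contra hne
          rw [h2 hne] at hk; exact Bool.false_ne_true hk
        simp [hj]
    | P =>
      simp only [pvOkM, ht] at hok
      simp only [pvContA, pvContB, ht]
      have hkl := pvKeeps_P dep l ht
      have harg : pvOkM dep (decide (([]:List String) ++ [l] ≠ []))
          (pvKeeps dep [l]) (decide (([]:List String) ≠ [])) rest = true := by
        rw [hkl]; simpa using hok
      have hrec := ih [] [l] (pvKeeps_nil dep) (fun h => absurd rfl h) harg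
      rw [hkl] at hrec
      simp only [List.nil_append] at hrec
      rw [hrec]
      cases hk : pvKeeps dep chunk with
      | false => simp
      | true =>
        have hj : junk = [] := by
          by_contra hne
          rw [h2 hne] at hk; exact Bool.false_ne_true hk
        simp [hj]
    | D =>
      simp only [pvOkM, ht] at hok
      simp only [pvContA, pvContB, ht]
      by_cases hm : pvMatches dep l = true
      · -- matching department
        rw [hm] at hok
        rw [if_pos (by trivial), Bool.and_eq_true] at hok
        obtain ⟨hp, hok'⟩ := hok
        have hj : junk = [] := by simpa using hp
        subst hj
        have hk' : pvKeeps dep (chunk ++ [l]) = true := by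
          rw [pvKeeps_append_D dep chunk l ht, hm]; simp
        have harg : pvOkM dep (decide (([]:List String) ++ (chunk ++ [l]) ≠ []))
            (pvKeeps dep (chunk ++ [l])) (decide (([]:List String) ≠ [])) rest = true := by
          have e1 : decide (([]:List String) ++ (chunk ++ [l]) ≠ []) = true := by simp
          have e2 : decide (([]:List String) ≠ []) = false := by simp
          rw [e1, e2, hk']
          simpa using hok'
        have hrec := ih [] (chunk ++ [l]) (pvKeeps_nil dep) (fun h => absurd rfl h) harg
        rw [hk'] at hrec
        simp only [List.nil_append] at hrec ⊢
        rw [hm, if_pos (by trivial)]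
        exact hrec
      · -- no matching department on this line
        rw [Bool.not_eq_true] at hm
        rw [hm] at hok
        rw [if_neg (by simp)] at hok
        have hk' : pvKeeps dep (chunk ++ [l]) = pvKeeps dep chunk := by
          rw [pvKeeps_append_D dep chunk l ht, hm]; simp
        have harg : pvOkM dep (decide (junk ++ (chunk ++ [l]) ≠ []))
            (pvKeeps dep (chunk ++ [l])) (decide (junk ≠ [])) rest = true := by
          have e : decide (junk ++ (chunk ++ [l]) ≠ []) = true := by simp
          rw [e, hk']; exact hok
        have hrec := ih junk (chunk ++ [l]) h1 (fun h => by rw [hk']; exact h2 h) harg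
        rw [hk'] at hrec
        rw [← List.append_assoc] at hrec
        rw [hm, if_neg (by simp)]
        exact hrec
    | O =>
      simp only [pvOkM, ht] at hok
      simp only [pvContA, pvContB, ht]
      have hk' : pvKeeps dep (chunk ++ [l]) = pvKeeps dep chunk :=
        pvKeeps_append_O dep chunk l ht
      have harg : pvOkM dep (decide (junk ++ (chunk ++ [l]) ≠ []))
          (pvKeeps dep (chunk ++ [l])) (decide (junk ≠ [])) rest = true := by
        have e : decide (junk ++ (chunk ++ [l]) ≠ []) = true := by simp
        rw [e, hk']; exact hok
      have hrec := ih junk (chunk ++ [l]) h1 (fun h => by rw [hk']; exact h2 h) harg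
      rw [hk'] at hrec
      rw [← List.append_assoc] at hrec
      exact hrec

-- ===== VERDICT (by name: the statements are the Claim_ definitions above) =====
theorem filter_context_by_department_py_spec : Claim_equal_filter_context_by_department_py := by
  intro context department _dom hpre
  unfold Spec_filter_context_by_department_py
  unfold filter_context_by_department_py filter_context_by_department_py_alt
  split_ifs with h
  · rfl
  · obtain ⟨hne, hin⟩ := not_or.mp h
    have hok : pvOkM (PySem.Str.lower department) false false false
        ((PySem.Str.split? context "\n").getD []) = true := by
      rcases hpre with hs | ha
      · apply pvScanM_okM
        rw [← pvScan_eq, pvSplit_toList]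
        exact hs
      · apply pvKeeps_okM
        rw [← pvAny_eq, pvSplit_toList]
        exact ha
    have hA := pvFoldA_cont department ((PySem.Str.split? context "\n").getD [])
      [] false "" []
    have hB := pvFoldB_cont (PySem.Str.lower department)
      ((PySem.Str.split? context "\n").getD []) [] []
    simp only at hA hB
    show PySem.Str.join "\n"
        ((((PySem.Str.split? context "\n").getD []).foldl (pvStepA department) ([], false, "", [])).1 ++
          (if (((PySem.Str.split? context "\n").getD []).foldl (pvStepA department) ([], false, "", [])).2.1 then
            (((PySem.Str.split? context "\n").getD []).foldl (pvStepA department) ([], false, "", [])).2.2.2 else [])) =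
      PySem.Str.join "\n"
        (((((PySem.Str.split? context "\n").getD []).foldl pvStepB ([], [])).1 ++
          [PvUnit.chunk ((((PySem.Str.split? context "\n").getD []).foldl pvStepB ([], [])).2)]).flatMap
          (pvRenderU (PySem.Str.lower department)))
    rw [hA, hB]
    simp only [List.nil_append]
    have hmain := pvMain (PySem.Str.lower department)
      ((PySem.Str.split? context "\n").getD []) [] []
      (pvKeeps_nil _) (fun h => absurd rfl h)
      (by simpa [pvKeeps_nil] using hok)
    rw [pvKeeps_nil] at hmain
    simp only [List.nil_append] at hmain
    rw [hmain]
    simp
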